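-- pv_equiv track=rewrite | github.com/BWSI-RACECAR/code-clash-16-Sre-A | isracecarbounded.py | isracecarbounded
-- ===== SOURCE A (Python) =====
-- def isracecarbounded(instructions):
--     # type instructions: string
--     # return type: boolean
--     initial_pos = [0, 0]
--     cur_pos = [0, 0]
--     # direction = ['S': 0, 'W': 1, 'N': 2, 'E': 3] Reference for cur_dir (current direction)
--     cur_dir = 2
--     visited_positions = set()  # Set to store visited positions
--
--     for _ in range(4):  # The loop may be formed with multiple runs (maximum 4 runs)
--         for instruction in instructions:
--             if instruction == 'G':
--                 if cur_dir == 0:  # Facing north, move up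
--                     cur_pos[1] += 1
--                 elif cur_dir == 1:  # Facing west, move left
--                     cur_pos[0] -= 1
--                 elif cur_dir == 2:  # Facing south, move down
--                     cur_pos[1] -= 1
--                 elif cur_dir == 3:  # Facing east, move right
--                     cur_pos[0] += 1
--             elif instruction == 'L':
--                 cur_dir = (cur_dir - 1) % 4  # Turn 90 degrees left
--             elif instruction == 'R':
--                 cur_dir = (cur_dir + 1) % 4  # Turn 90 degrees right
--
--             visited_positions.add(tuple(cur_pos))  # Add current position to visited set
--
--         if tuple(initial_pos) in visited_positions:
--             return True  # The racecar returned to the starting position, loop found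
--
--     return False  # After 4 runs, no loop found
-- ===== SOURCE B (Python) =====
-- def isracecarbounded(instructions):
--     # One simulation of a single run, recording the set of relative prefix
--     # positions; every later run is a rotated+translated copy of that base
--     # trajectory, so "run k hits the origin" is a single set-membership test.
--     x = y = 0
--     dx, dy = 0, -1            # facing south
--     seen = set()
--     for c in instructions:
--         if c == 'G':
--             x, y = x + dx, y + dy
--         elif c == 'L':
--             dx, dy = dy, -dx
--         elif c == 'R':
--             dx, dy = -dy, dx
--         seen.add((x, y))
--     wr, wi = -dy, dx          # rotation of one run (final facing over south), as a Gaussian integer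
--     sx = sy = 0               # start position of run k
--     rr, ri = 1, 0             # rotation of run k (= w**k)
--     for _ in range(4):
--         # run k hits the origin iff w**-k * (-start_k) lies on the base trajectory
--         if (-(sx * rr + sy * ri), -(sy * rr - sx * ri)) in seen:
--             return True
--         sx, sy = sx + rr * x - ri * y, sy + ri * x + rr * y
--         rr, ri = rr * wr - ri * wi, ri * wr + rr * wi
--     return False
-- ===== Notes on version B (the rewrite author's own statement) =====
-- stated objective: alternative
-- what changed: Instead of re-simulating the walk four times into an accumulating visited set, B simulates the string once to get the base trajectory (as a set of prefix positions), its net displacement and net rotation, and then decides each of the 4 runs by a single set-membership test, since run k is a rotated+translated copy of the base trajectory and hits the origin iff the inverse-rotated negated start point lies on it.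
import Mathlib
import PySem

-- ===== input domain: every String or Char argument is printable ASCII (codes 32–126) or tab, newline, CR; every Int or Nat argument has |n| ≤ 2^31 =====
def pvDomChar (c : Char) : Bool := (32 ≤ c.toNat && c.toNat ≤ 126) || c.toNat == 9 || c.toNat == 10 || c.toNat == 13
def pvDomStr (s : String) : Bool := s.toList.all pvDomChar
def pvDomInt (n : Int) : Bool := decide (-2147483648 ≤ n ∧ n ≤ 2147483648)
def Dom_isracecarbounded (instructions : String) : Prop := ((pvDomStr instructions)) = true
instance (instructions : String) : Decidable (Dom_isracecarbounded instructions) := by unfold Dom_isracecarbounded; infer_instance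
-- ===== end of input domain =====

-- B simulates the instruction string ONCE, recording the set of relative prefix positions;
-- each of the 4 runs is a rotated+translated copy of that base trajectory, so "run k hits
-- the origin" becomes a single set-membership test. Return values agree on every input.

-- ===== PORT A =====
-- inner 'for instruction in instructions' loop: state (cur_pos, cur_dir, visited_positions)
def pvInnerA (cs : List Char) (pos : Int × Int) (dir : Int)
    (vis : PySem.Set (Int × Int)) : (Int × Int) × Int × PySem.Set (Int × Int) :=
  match cs with
  | [] => (pos, dir, vis)
  | c :: rest =>
    let pos' := if c = 'G' then
        (if dir = 0 then (pos.1, pos.2 + 1)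
         else if dir = 1 then (pos.1 - 1, pos.2)
         else if dir = 2 then (pos.1, pos.2 - 1)
         else if dir = 3 then (pos.1 + 1, pos.2)
         else pos)
      else pos
    let dir' := if c = 'G' then dir
      else if c = 'L' then PySem.Int.mod (dir - 1) 4
      else if c = 'R' then PySem.Int.mod (dir + 1) 4
      else dir
    pvInnerA rest pos' dir' (PySem.Set.add vis pos')

-- outer 'for _ in range(4)' loop with its early 'return True'
def pvOuterA (instructions : String) (n : Nat) (pos : Int × Int) (dir : Int)
    (vis : PySem.Set (Int × Int)) : Bool :=
  match n with
  | 0 => false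
  | n + 1 =>
    let r := pvInnerA instructions.toList pos dir vis
    if PySem.Set.contains r.2.2 ((0 : Int), (0 : Int)) then true
    else pvOuterA instructions n r.1 r.2.1 r.2.2

def isracecarbounded (instructions : String) : Bool :=
  pvOuterA instructions 4 (0, 0) 2 PySem.Set.empty

-- ===== PORT B =====
-- Source B's first loop: one simulated run from the origin facing south, collecting the set
-- of prefix positions; state ((x,y),(dx,dy),seen)
def pvBaseStep (st : (Int × Int) × (Int × Int) × PySem.Set (Int × Int)) (c : Char) :
    (Int × Int) × (Int × Int) × PySem.Set (Int × Int) :=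
  let z := st.1
  let d := st.2.1
  let z' := if c = 'G' then (z.1 + d.1, z.2 + d.2) else z
  let d' := if c = 'G' then d
    else if c = 'L' then (d.2, -d.1)
    else if c = 'R' then (-d.2, d.1)
    else d
  (z', d', PySem.Set.add st.2.2 z')

-- Source B's second loop ('for _ in range(4)' with early return): run k starts at s with
-- accumulated rotation r (a Gaussian integer); it hits the origin iff r⁻¹·(-s) is in seen
def pvCheck (seen : PySem.Set (Int × Int)) (w delta : Int × Int) :
    Nat → (Int × Int) → (Int × Int) → Bool
  | 0, _, _ => false
  | n + 1, s, r =>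
    if PySem.Set.contains seen (-(s.1 * r.1 + s.2 * r.2), -(s.2 * r.1 - s.1 * r.2)) then true
    else pvCheck seen w delta n
      (s.1 + r.1 * delta.1 - r.2 * delta.2, s.2 + r.2 * delta.1 + r.1 * delta.2)
      (r.1 * w.1 - r.2 * w.2, r.2 * w.1 + r.1 * w.2)

def isracecarbounded_alt (instructions : String) : Bool :=
  let b := instructions.toList.foldl pvBaseStep ((0, 0), (0, -1), PySem.Set.empty)
  pvCheck b.2.2 (-b.2.1.2, b.2.1.1) b.1 4 (0, 0) (1, 0)

-- ===== PRECONDITION & SPEC =====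
def Spec_isracecarbounded (instructions : String) (out : Bool) : Prop := out = isracecarbounded_alt instructions
instance (instructions : String) (out : Bool) : Decidable (Spec_isracecarbounded instructions out) := by unfold Spec_isracecarbounded; infer_instance

-- ===== CLAIM (what is proved, stated in full; the proofs are below) =====
def Claim_equal_isracecarbounded : Prop := ∀ (instructions : String), Dom_isracecarbounded instructions → Spec_isracecarbounded instructions (isracecarbounded instructions)

-- ===== LEMMAS AND PROOFS =====

-- Gaussian-integer arithmetic on pairs, used only by the proofs
def cmul (a b : Int × Int) : Int × Int := (a.1 * b.1 - a.2 * b.2, a.1 * b.2 + a.2 * b.1)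
def padd (a b : Int × Int) : Int × Int := (a.1 + b.1, a.2 + b.2)

-- A's direction index read as a direction vector
def pvDirVec (dir : Int) : Int × Int :=
  if dir = 0 then (0, 1) else if dir = 1 then (-1, 0)
  else if dir = 2 then (0, -1) else (1, 0)

theorem pvMoveVec (dir : Int) (h0 : 0 ≤ dir) (h4 : dir < 4) (pos : Int × Int) :
    (if dir = 0 then (pos.1, pos.2 + 1)
     else if dir = 1 then (pos.1 - 1, pos.2)
     else if dir = 2 then (pos.1, pos.2 - 1)
     else if dir = 3 then (pos.1 + 1, pos.2)
     else pos) = padd pos (pvDirVec dir) := by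
  have : dir = 0 ∨ dir = 1 ∨ dir = 2 ∨ dir = 3 := by omega
  rcases this with h | h | h | h <;> subst h <;> simp [pvDirVec, padd] <;> ring

theorem pvDirL (dir : Int) (h0 : 0 ≤ dir) (h4 : dir < 4) :
    pvDirVec (PySem.Int.mod (dir - 1) 4) = cmul (pvDirVec dir) (0, -1) := by
  have : dir = 0 ∨ dir = 1 ∨ dir = 2 ∨ dir = 3 := by omega
  rcases this with h | h | h | h <;> subst h <;> decide

theorem pvDirR (dir : Int) (h0 : 0 ≤ dir) (h4 : dir < 4) :
    pvDirVec (PySem.Int.mod (dir + 1) 4) = cmul (pvDirVec dir) (0, 1) := by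
  have : dir = 0 ∨ dir = 1 ∨ dir = 2 ∨ dir = 3 := by omega
  rcases this with h | h | h | h <;> subst h <;> decide

theorem cmul_cmul (a b c : Int × Int) : cmul a (cmul b c) = cmul (cmul a b) c := by
  simp only [cmul, Prod.mk.injEq]; constructor <;> ring

theorem cmul_padd (r a b : Int × Int) : cmul r (padd a b) = padd (cmul r a) (cmul r b) := by
  simp only [cmul, padd, Prod.mk.injEq]; constructor <;> ring

theorem pvNormSq_cmul (a b : Int × Int) :
    (cmul a b).1 * (cmul a b).1 + (cmul a b).2 * (cmul a b).2
      = (a.1 * a.1 + a.2 * a.2) * (b.1 * b.1 + b.2 * b.2) := by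
  simp only [cmul]; ring

theorem pvNormSq_dirVec (dir : Int) (h0 : 0 ≤ dir) (h4 : dir < 4) :
    (pvDirVec dir).1 * (pvDirVec dir).1 + (pvDirVec dir).2 * (pvDirVec dir).2 = 1 := by
  have : dir = 0 ∨ dir = 1 ∨ dir = 2 ∨ dir = 3 := by omega
  rcases this with h | h | h | h <;> subst h <;> decide

-- origin hit S + R·p = 0, for unit R, means p is the fixed point R⁻¹·(-S)
theorem pvHitIff (seen : PySem.Set (Int × Int)) (S R : Int × Int)
    (hR : R.1 * R.1 + R.2 * R.2 = 1) :
    (∃ p ∈ seen, padd S (cmul R p) = ((0 : Int), (0 : Int)))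
      ↔ (-(S.1 * R.1 + S.2 * R.2), -(S.2 * R.1 - S.1 * R.2)) ∈ seen := by
  have key : ∀ p : Int × Int, padd S (cmul R p) = ((0 : Int), (0 : Int))
      ↔ p = (-(S.1 * R.1 + S.2 * R.2), -(S.2 * R.1 - S.1 * R.2)) := by
    intro p
    simp only [padd, cmul, Prod.ext_iff]
    constructor
    · rintro ⟨h1, h2⟩
      constructor
      · linear_combination R.1 * h1 + R.2 * h2 - p.1 * hR
      · linear_combination R.1 * h2 - R.2 * h1 - p.2 * hR
    · rintro ⟨h1, h2⟩
      constructor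
      · rw [h1, h2]; linear_combination (-S.1) * hR
      · rw [h1, h2]; linear_combination (-S.2) * hR
  constructor
  · rintro ⟨p, hp, h⟩; rwa [(key p).mp h] at hp
  · intro h; exact ⟨_, h, (key _).mpr rfl⟩

-- the inner run of A, started at S + R·z facing R·d with base state (z,d,seen),
-- tracks B's base fold through the rotation R
theorem pvInnerRel (C : Prop) : ∀ (cs : List Char) (z d : Int × Int)
    (seen : PySem.Set (Int × Int)) (dir : Int) (vis : PySem.Set (Int × Int)) (S R : Int × Int),
    0 ≤ dir → dir < 4 →
    pvDirVec dir = cmul R d →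
    (((0 : Int), (0 : Int)) ∈ vis ↔ (C ∨ ∃ p ∈ seen, padd S (cmul R p) = ((0 : Int), (0 : Int)))) →
    (pvInnerA cs (padd S (cmul R z)) dir vis).1
        = padd S (cmul R (List.foldl pvBaseStep (z, d, seen) cs).1)
    ∧ pvDirVec (pvInnerA cs (padd S (cmul R z)) dir vis).2.1
        = cmul R (List.foldl pvBaseStep (z, d, seen) cs).2.1
    ∧ 0 ≤ (pvInnerA cs (padd S (cmul R z)) dir vis).2.1
    ∧ (pvInnerA cs (padd S (cmul R z)) dir vis).2.1 < 4
    ∧ (((0 : Int), (0 : Int)) ∈ (pvInnerA cs (padd S (cmul R z)) dir vis).2.2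
        ↔ (C ∨ ∃ p ∈ (List.foldl pvBaseStep (z, d, seen) cs).2.2,
            padd S (cmul R p) = ((0 : Int), (0 : Int)))) := by
  intro cs
  induction cs with
  | nil =>
    intro z d seen dir vis S R h0 h4 hd hv
    exact ⟨rfl, hd, h0, h4, hv⟩
  | cons c rest ih =>
    intro z d seen dir vis S R h0 h4 hd hv
    have hvadd : ∀ z' : Int × Int,
        (((0 : Int), (0 : Int)) ∈ PySem.Set.add vis (padd S (cmul R z'))
          ↔ (C ∨ ∃ p ∈ PySem.Set.add seen z',
              padd S (cmul R p) = ((0 : Int), (0 : Int)))) := by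
      intro z'
      simp only [PySem.Set.mem_add, hv]
      constructor
      · rintro ((h | h) | h)
        · exact Or.inl h
        · obtain ⟨p, hp, he⟩ := h; exact Or.inr ⟨p, Or.inl hp, he⟩
        · exact Or.inr ⟨z', Or.inr rfl, h.symm⟩
      · rintro (h | ⟨p, hp | hp, he⟩)
        · exact Or.inl (Or.inl h)
        · exact Or.inl (Or.inr ⟨p, hp, he⟩)
        · subst hp; exact Or.inr he.symm
    by_cases hG : c = 'G'
    · subst hG
      have hpos : (if dir = 0 then ((padd S (cmul R z)).1, (padd S (cmul R z)).2 + 1)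
          else if dir = 1 then ((padd S (cmul R z)).1 - 1, (padd S (cmul R z)).2)
          else if dir = 2 then ((padd S (cmul R z)).1, (padd S (cmul R z)).2 - 1)
          else if dir = 3 then ((padd S (cmul R z)).1 + 1, (padd S (cmul R z)).2)
          else padd S (cmul R z)) = padd S (cmul R (padd z d)) := by
        rw [pvMoveVec dir h0 h4, hd, cmul_padd]
        simp only [padd, Prod.mk.injEq]; constructor <;> ring
      simp only [pvInnerA, List.foldl_cons, pvBaseStep, reduceIte, hpos]
      exact ih (padd z d) d (PySem.Set.add seen (padd z d)) dir
        (PySem.Set.add vis (padd S (cmul R (padd z d)))) S R h0 h4 hd (hvadd (padd z d))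
    · by_cases hL : c = 'L'
      · subst hL
        have hd' : pvDirVec (PySem.Int.mod (dir - 1) 4) = cmul R (d.2, -d.1) := by
          rw [pvDirL dir h0 h4, hd, ← cmul_cmul]
          simp only [cmul, Prod.mk.injEq]; constructor <;> ring
        simp only [pvInnerA, List.foldl_cons, pvBaseStep, hG, reduceIte]
        exact ih z (d.2, -d.1) (PySem.Set.add seen z) (PySem.Int.mod (dir - 1) 4)
          (PySem.Set.add vis (padd S (cmul R z))) S R
          (PySem.Int.mod_nonneg _ (by omega)) (PySem.Int.mod_lt _ (by omega))
          hd' (hvadd z)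
      · by_cases hR : c = 'R'
        · subst hR
          have hd' : pvDirVec (PySem.Int.mod (dir + 1) 4) = cmul R (-d.2, d.1) := by
            rw [pvDirR dir h0 h4, hd, ← cmul_cmul]
            simp only [cmul, Prod.mk.injEq]; constructor <;> ring
          simp only [pvInnerA, List.foldl_cons, pvBaseStep, hG, hL, reduceIte]
          exact ih z (-d.2, d.1) (PySem.Set.add seen z) (PySem.Int.mod (dir + 1) 4)
            (PySem.Set.add vis (padd S (cmul R z))) S R
            (PySem.Int.mod_nonneg _ (by omega)) (PySem.Int.mod_lt _ (by omega))
            hd' (hvadd z)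
        · simp only [pvInnerA, List.foldl_cons, pvBaseStep, hG, hL, hR, reduceIte]
          exact ih z d (PySem.Set.add seen z) dir
            (PySem.Set.add vis (padd S (cmul R z))) S R h0 h4 hd (hvadd z)

-- the outer loops run in lockstep: A's k-th run-and-check equals B's k-th membership test
theorem pvOuterRel (s : String) : ∀ (n : Nat) (dir : Int) (S R : Int × Int)
    (vis : PySem.Set (Int × Int)),
    0 ≤ dir → dir < 4 →
    pvDirVec dir = cmul R (0, -1) →
    R.1 * R.1 + R.2 * R.2 = 1 →
    (((0 : Int), (0 : Int)) ∉ vis) →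
    pvOuterA s n S dir vis
      = pvCheck (s.toList.foldl pvBaseStep ((0, 0), (0, -1), PySem.Set.empty)).2.2
          (-(s.toList.foldl pvBaseStep ((0, 0), (0, -1), PySem.Set.empty)).2.1.2,
            (s.toList.foldl pvBaseStep ((0, 0), (0, -1), PySem.Set.empty)).2.1.1)
          (s.toList.foldl pvBaseStep ((0, 0), (0, -1), PySem.Set.empty)).1 n S R := by
  intro n
  induction n with
  | zero => intro dir S R vis _ _ _ _ _; rfl
  | succ n ih =>
    intro dir S R vis h0 h4 hd hR hv
    have hS : padd S (cmul R ((0 : Int), (0 : Int))) = S := by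
      simp [padd, cmul]
    have hv' : (((0 : Int), (0 : Int)) ∈ vis
        ↔ (False ∨ ∃ p ∈ (PySem.Set.empty : PySem.Set (Int × Int)),
            padd S (cmul R p) = ((0 : Int), (0 : Int)))) := by
      simp [hv, PySem.Set.empty]
    have H := pvInnerRel False s.toList ((0 : Int), (0 : Int)) ((0 : Int), (-1 : Int))
      PySem.Set.empty dir vis S R h0 h4 hd hv'
    rw [hS] at H
    obtain ⟨hp, hdv, hb0, hb4, hm⟩ := H
    have hcond : PySem.Set.contains
          (pvInnerA s.toList S dir vis).2.2 ((0 : Int), (0 : Int))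
        = PySem.Set.contains
            (s.toList.foldl pvBaseStep ((0, 0), (0, -1), PySem.Set.empty)).2.2
            (-(S.1 * R.1 + S.2 * R.2), -(S.2 * R.1 - S.1 * R.2)) := by
      rw [Bool.eq_iff_iff, PySem.Set.contains_iff, PySem.Set.contains_iff, hm,
        pvHitIff _ S R hR]
      simp
    simp only [pvOuterA, pvCheck, hcond]
    by_cases hhit : PySem.Set.contains
        (s.toList.foldl pvBaseStep ((0, 0), (0, -1), PySem.Set.empty)).2.2
        (-(S.1 * R.1 + S.2 * R.2), -(S.2 * R.1 - S.1 * R.2)) = true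
    · simp only [hhit, reduceIte]
    · simp only [hhit, Bool.false_eq_true, reduceIte]
      have hbdnorm : (s.toList.foldl pvBaseStep ((0, 0), (0, -1), PySem.Set.empty)).2.1.1
            * (s.toList.foldl pvBaseStep ((0, 0), (0, -1), PySem.Set.empty)).2.1.1
          + (s.toList.foldl pvBaseStep ((0, 0), (0, -1), PySem.Set.empty)).2.1.2
            * (s.toList.foldl pvBaseStep ((0, 0), (0, -1), PySem.Set.empty)).2.1.2 = 1 := by
        have h1 := pvNormSq_cmul R
          (s.toList.foldl pvBaseStep ((0, 0), (0, -1), PySem.Set.empty)).2.1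
        rw [← hdv] at h1
        rw [pvNormSq_dirVec _ hb0 hb4, hR] at h1
        linarith [h1]
      have hpos' : (pvInnerA s.toList S dir vis).1
          = (S.1 + R.1 * (s.toList.foldl pvBaseStep ((0, 0), (0, -1), PySem.Set.empty)).1.1
              - R.2 * (s.toList.foldl pvBaseStep ((0, 0), (0, -1), PySem.Set.empty)).1.2,
             S.2 + R.2 * (s.toList.foldl pvBaseStep ((0, 0), (0, -1), PySem.Set.empty)).1.1
              + R.1 * (s.toList.foldl pvBaseStep ((0, 0), (0, -1), PySem.Set.empty)).1.2) := by
        rw [hp]; simp only [padd, cmul, Prod.mk.injEq]; constructor <;> ring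
      have hrot : pvDirVec (pvInnerA s.toList S dir vis).2.1
          = cmul (R.1 * -(s.toList.foldl pvBaseStep ((0, 0), (0, -1), PySem.Set.empty)).2.1.2
                    - R.2 * (s.toList.foldl pvBaseStep ((0, 0), (0, -1), PySem.Set.empty)).2.1.1,
                  R.2 * -(s.toList.foldl pvBaseStep ((0, 0), (0, -1), PySem.Set.empty)).2.1.2
                    + R.1 * (s.toList.foldl pvBaseStep ((0, 0), (0, -1), PySem.Set.empty)).2.1.1)
              ((0 : Int), (-1 : Int)) := by
        rw [hdv]; simp only [cmul, Prod.mk.injEq]; constructor <;> ring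
      have hnorm' : (R.1 * -(s.toList.foldl pvBaseStep ((0, 0), (0, -1), PySem.Set.empty)).2.1.2
              - R.2 * (s.toList.foldl pvBaseStep ((0, 0), (0, -1), PySem.Set.empty)).2.1.1)
            * (R.1 * -(s.toList.foldl pvBaseStep ((0, 0), (0, -1), PySem.Set.empty)).2.1.2
              - R.2 * (s.toList.foldl pvBaseStep ((0, 0), (0, -1), PySem.Set.empty)).2.1.1)
          + (R.2 * -(s.toList.foldl pvBaseStep ((0, 0), (0, -1), PySem.Set.empty)).2.1.2
              + R.1 * (s.toList.foldl pvBaseStep ((0, 0), (0, -1), PySem.Set.empty)).2.1.1)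
            * (R.2 * -(s.toList.foldl pvBaseStep ((0, 0), (0, -1), PySem.Set.empty)).2.1.2
              + R.1 * (s.toList.foldl pvBaseStep ((0, 0), (0, -1), PySem.Set.empty)).2.1.1) = 1 := by
        nlinarith [hR, hbdnorm]
      have hnv : ((0 : Int), (0 : Int)) ∉ (pvInnerA s.toList S dir vis).2.2 := by
        intro hc
        exact hhit (hcond ▸ (PySem.Set.contains_iff _ _).mpr hc)
      rw [hpos']
      exact ih (pvInnerA s.toList S dir vis).2.1 _ _ (pvInnerA s.toList S dir vis).2.2
        hb0 hb4 hrot hnorm' hnv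

-- ===== VERDICT (by name: the statement is the Claim_ definition above) =====
theorem isracecarbounded_spec : Claim_equal_isracecarbounded := by
  intro s _
  unfold Spec_isracecarbounded isracecarbounded isracecarbounded_alt
  rw [pvOuterRel s 4 2 (0, 0) (1, 0) PySem.Set.empty (by norm_num) (by norm_num)
    (by decide) (by decide) (by decide)]
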